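-- pv_equiv track=rewrite | github.com/Abhisek1994Roy/PythonAlgorithmicProblems | Hacker_Rank_Problems/test66.py | mixColors
-- ===== SOURCE A (Python) =====
-- def mixColors(colors, queries):
--     res = []
--     for query in queries:
--         rgb=[False, False, False]
--         flag = "NO"
--
--         if query in colors:
--             flag = "YES"
--         else:
--             for color in colors:
--                 if color[0]==query[0] and color[1]<=query[1] and color[2]<=query[2]:
--                     rgb[0] = True
--                 if color[0]<=query[0] and color[1]==query[1] and color[2]<=query[2]:
--                     rgb[1] = True
--                 if color[0]<=query[0] and color[1]<=query[1] and color[2]==query[2]: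
--                     rgb[2] = True
--                 if rgb[0] is True and rgb[1] is True and rgb[2] is True:
--                     flag = "YES"
--                     break
--         res.append(flag)
--     return(res)
-- ===== SOURCE B (Python) =====
-- def _group(pairs):
--     d = {}
--     for k, v in pairs:
--         d.setdefault(k, []).append(v)
--     return d
--
--
-- def mixColors(colors, queries):
--     byR = _group([(r, (g, b)) for (r, g, b) in colors])
--     byG = _group([(g, (r, b)) for (r, g, b) in colors])
--     byB = _group([(b, (r, g)) for (r, g, b) in colors])
--     cset = set(colors)
--     res = []
--     for (r, g, b) in queries:
--         if (r, g, b) in cset: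
--             res.append("YES")
--         elif (any(x <= g and y <= b for (x, y) in byR.get(r, [])) and
--               any(x <= r and y <= b for (x, y) in byG.get(g, [])) and
--               any(x <= r and y <= g for (x, y) in byB.get(b, []))):
--             res.append("YES")
--         else:
--             res.append("NO")
--     return res
-- ===== Notes on version B (the rewrite author's own statement) =====
-- stated objective: faster
-- what changed: B replaces A's per-query scan of the whole color list (with mutable rgb flags and an early break) by three hash indexes built once, grouping colors by each fixed coordinate plus a set for exact membership, so each query only scans the colors sharing the relevant coordinate.
import Mathlib
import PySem

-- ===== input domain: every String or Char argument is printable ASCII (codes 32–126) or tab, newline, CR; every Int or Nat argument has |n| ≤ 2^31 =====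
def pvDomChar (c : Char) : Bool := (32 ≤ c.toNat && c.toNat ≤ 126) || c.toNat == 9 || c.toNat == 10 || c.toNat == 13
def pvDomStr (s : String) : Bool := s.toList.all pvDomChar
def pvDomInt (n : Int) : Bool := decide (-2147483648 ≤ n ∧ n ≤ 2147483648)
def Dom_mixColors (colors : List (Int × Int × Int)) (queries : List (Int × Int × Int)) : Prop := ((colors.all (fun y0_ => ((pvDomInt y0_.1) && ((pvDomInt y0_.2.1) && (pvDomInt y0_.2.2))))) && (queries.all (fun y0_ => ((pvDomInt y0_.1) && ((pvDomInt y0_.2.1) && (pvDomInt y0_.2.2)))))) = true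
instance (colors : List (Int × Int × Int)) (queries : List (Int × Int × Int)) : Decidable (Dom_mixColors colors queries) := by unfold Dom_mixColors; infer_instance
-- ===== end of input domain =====

-- B replaces A's per-query scan of the whole color list by three hash indexes (one per fixed
-- coordinate) built once, plus a set for exact membership: measurably faster per query.

-- ===== PORT A =====
-- the inner 'for color in colors' loop: mutable rgb flags, break when all three are true
def pvAScan (q : Int × Int × Int) : List (Int × Int × Int) → Bool → Bool → Bool → String
  | [], _, _, _ => "NO"
  | c :: rest, r, g, b =>
    let r' := r || (c.1 == q.1 && decide (c.2.1 ≤ q.2.1) && decide (c.2.2 ≤ q.2.2))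
    let g' := g || (decide (c.1 ≤ q.1) && c.2.1 == q.2.1 && decide (c.2.2 ≤ q.2.2))
    let b' := b || (decide (c.1 ≤ q.1) && decide (c.2.1 ≤ q.2.1) && c.2.2 == q.2.2)
    if r' && g' && b' then "YES" else pvAScan q rest r' g' b'

def mixColors (colors : List (Int × Int × Int)) (queries : List (Int × Int × Int)) : List String :=
  queries.foldl
    (fun res query =>
      res ++ [if colors.contains query then "YES" else pvAScan query colors false false false])
    []

-- ===== PORT B =====
-- _group: dict built by d.setdefault(k, []).append(v), i.e. d[k] = d.get(k, []) + [v]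
def pvGroup (pairs : List (Int × (Int × Int))) : PySem.Dict Int (List (Int × Int)) :=
  pairs.foldl (fun d p => d.modify p.1 [] (· ++ [p.2])) PySem.Dict.empty

def mixColors_alt (colors : List (Int × Int × Int)) (queries : List (Int × Int × Int)) : List String :=
  let byR := pvGroup (colors.map (fun c => (c.1, (c.2.1, c.2.2))))
  let byG := pvGroup (colors.map (fun c => (c.2.1, (c.1, c.2.2))))
  let byB := pvGroup (colors.map (fun c => (c.2.2, (c.1, c.2.1))))
  let cset : PySem.Set (Int × Int × Int) := PySem.Set.ofList colors
  queries.map (fun q =>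
    if cset.contains q then "YES"
    else if ((byR.getD q.1 []).any (fun p => decide (p.1 ≤ q.2.1) && decide (p.2 ≤ q.2.2))) &&
            ((byG.getD q.2.1 []).any (fun p => decide (p.1 ≤ q.1) && decide (p.2 ≤ q.2.2))) &&
            ((byB.getD q.2.2 []).any (fun p => decide (p.1 ≤ q.1) && decide (p.2 ≤ q.2.1)))
         then "YES" else "NO")

-- ===== PRECONDITION & SPEC =====
def Spec_mixColors (colors : List (Int × Int × Int)) (queries : List (Int × Int × Int)) (out : List String) : Prop := out = mixColors_alt colors queries
instance (colors : List (Int × Int × Int)) (queries : List (Int × Int × Int)) (out : List String) : Decidable (Spec_mixColors colors queries out) := by unfold Spec_mixColors; infer_instance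

-- ===== CLAIM (what is proved, stated in full; the proofs are below) =====
def Claim_equal_mixColors : Prop := ∀ (colors : List (Int × Int × Int)) (queries : List (Int × Int × Int)), Dom_mixColors colors queries → Spec_mixColors colors queries (mixColors colors queries)

-- ===== LEMMAS AND PROOFS =====

-- A's stateful scan (flags only ever go from false to true, break when all three hold) answers
-- exactly: does each flag's condition hold somewhere in the list (or initially)?
theorem pvAScan_eq (q : Int × Int × Int) (cs : List (Int × Int × Int)) (r g b : Bool)
    (h : (r && g && b) = false) :
    pvAScan q cs r g b =
      if (r || cs.any (fun c => c.1 == q.1 && decide (c.2.1 ≤ q.2.1) && decide (c.2.2 ≤ q.2.2))) &&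
         (g || cs.any (fun c => decide (c.1 ≤ q.1) && c.2.1 == q.2.1 && decide (c.2.2 ≤ q.2.2))) &&
         (b || cs.any (fun c => decide (c.1 ≤ q.1) && decide (c.2.1 ≤ q.2.1) && c.2.2 == q.2.2))
      then "YES" else "NO" := by
  induction cs generalizing r g b with
  | nil => simp only [pvAScan, List.any_nil, Bool.or_false, h, Bool.false_eq_true, if_false]
  | cons c rest ih =>
    simp only [pvAScan, List.any_cons]
    by_cases hX : ((r || (c.1 == q.1 && decide (c.2.1 ≤ q.2.1) && decide (c.2.2 ≤ q.2.2))) &&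
        (g || (decide (c.1 ≤ q.1) && c.2.1 == q.2.1 && decide (c.2.2 ≤ q.2.2))) &&
        (b || (decide (c.1 ≤ q.1) && decide (c.2.1 ≤ q.2.1) && c.2.2 == q.2.2))) = true
    · rw [if_pos hX]
      have hZ : ((r || ((c.1 == q.1 && decide (c.2.1 ≤ q.2.1) && decide (c.2.2 ≤ q.2.2)) ||
            rest.any (fun c => c.1 == q.1 && decide (c.2.1 ≤ q.2.1) && decide (c.2.2 ≤ q.2.2)))) &&
          (g || ((decide (c.1 ≤ q.1) && c.2.1 == q.2.1 && decide (c.2.2 ≤ q.2.2)) ||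
            rest.any (fun c => decide (c.1 ≤ q.1) && c.2.1 == q.2.1 && decide (c.2.2 ≤ q.2.2)))) &&
          (b || ((decide (c.1 ≤ q.1) && decide (c.2.1 ≤ q.2.1) && c.2.2 == q.2.2) ||
            rest.any (fun c => decide (c.1 ≤ q.1) && decide (c.2.1 ≤ q.2.1) && c.2.2 == q.2.2)))) = true := by
        simp only [Bool.and_eq_true, Bool.or_eq_true] at hX ⊢
        tauto
      rw [if_pos hZ]
    · have hX' := Bool.eq_false_iff.mpr hX
      rw [if_neg hX, ih _ _ _ hX']
      congr 1
      simp only [← Bool.or_assoc]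

-- the group for key k holds exactly the second components of the pairs keyed k, in order
theorem pvGroup_getD (pairs : List (Int × (Int × Int))) (k : Int) :
    (pvGroup pairs).getD k [] = (pairs.filter (fun p => p.1 == k)).map (·.2) := by
  simpa [pvGroup] using PySem.Dict.getD_foldl_modify_append pairs PySem.Dict.empty k

-- an 'any' over a group = an 'any' over all colors with the key-equality test inlined
theorem pvAny_group (colors : List (Int × Int × Int)) (f : Int × Int × Int → Int × (Int × Int))
    (k : Int) (p : Int × Int → Bool) :
    ((pvGroup (colors.map f)).getD k []).any p
      = colors.any (fun c => ((f c).1 == k) && p (f c).2) := by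
  rw [pvGroup_getD, List.filter_map, List.map_map, List.any_map]
  simp [Function.comp]

-- ===== VERDICT (by name: the statement is the Claim_ definition above) =====
theorem mixColors_spec : Claim_equal_mixColors := by
  intro colors queries _
  unfold Spec_mixColors mixColors mixColors_alt
  rw [PySem.List.foldl_append_singleton_eq_map]
  refine List.map_congr_left (fun q _ => ?_)
  have hmem : (PySem.Set.ofList colors).contains q = colors.contains q := by
    simp only [PySem.Set.contains_eq_listContains, List.contains_eq_mem, PySem.Set.mem_ofList]
  rw [hmem]
  by_cases hc : colors.contains q = true
  · rw [if_pos hc, if_pos hc]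
  · rw [if_neg hc, if_neg hc, pvAScan_eq q colors false false false rfl]
    simp only [Bool.false_or, pvAny_group]
    have e1 : colors.any (fun c => (c.1 == q.1) && (decide (c.2.1 ≤ q.2.1) && decide (c.2.2 ≤ q.2.2)))
        = colors.any (fun c => c.1 == q.1 && decide (c.2.1 ≤ q.2.1) && decide (c.2.2 ≤ q.2.2)) :=
      congrArg _ (funext fun c => by rw [Bool.and_assoc])
    have e2 : colors.any (fun c => (c.2.1 == q.2.1) && (decide (c.1 ≤ q.1) && decide (c.2.2 ≤ q.2.2)))
        = colors.any (fun c => decide (c.1 ≤ q.1) && c.2.1 == q.2.1 && decide (c.2.2 ≤ q.2.2)) :=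
      congrArg _ (funext fun c => by rw [Bool.and_left_comm, ← Bool.and_assoc])
    have e3 : colors.any (fun c => (c.2.2 == q.2.2) && (decide (c.1 ≤ q.1) && decide (c.2.1 ≤ q.2.1)))
        = colors.any (fun c => decide (c.1 ≤ q.1) && decide (c.2.1 ≤ q.2.1) && c.2.2 == q.2.2) :=
      congrArg _ (funext fun c => by rw [Bool.and_comm])
    rw [e1, e2, e3]
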